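-- pv_equiv track=rewrite | github.com/TADIYOS49/competitive_programming | A_A_pile_of_stones.py | solve
-- ===== SOURCE A (Python) =====
-- def solve(arr,m):
--     for i in arr:
--         if i == "+":
--             m += 1
--         elif i == "-":
--             m -= 1
--         if m < 0:
--             return False
--     if m >= 0:
--         return True
--     else:
--         return False
-- ===== SOURCE B (Python) =====
-- def solve(arr, m):
--     # Backwards pass: compute the minimal initial pile size `req` that makes
--     # the whole operation sequence valid, then compare m against it once.
--     req = 0
--     for c in reversed(arr):
--         if c == "+":
--             req = max(0, req) - 1
--         elif c == "-":
--             req = max(0, req) + 1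
--         else:
--             req = max(0, req)
--     return m >= req
-- ===== Notes on version B (the rewrite author's own statement) =====
-- stated objective: alternative
-- what changed: Replaces A's forward scan of the running pile with early exit by a backwards right-to-left pass that computes the minimal required initial pile size (req = max(0,req) -/+ 1 per op), followed by a single comparison m >= req.
import Mathlib
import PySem

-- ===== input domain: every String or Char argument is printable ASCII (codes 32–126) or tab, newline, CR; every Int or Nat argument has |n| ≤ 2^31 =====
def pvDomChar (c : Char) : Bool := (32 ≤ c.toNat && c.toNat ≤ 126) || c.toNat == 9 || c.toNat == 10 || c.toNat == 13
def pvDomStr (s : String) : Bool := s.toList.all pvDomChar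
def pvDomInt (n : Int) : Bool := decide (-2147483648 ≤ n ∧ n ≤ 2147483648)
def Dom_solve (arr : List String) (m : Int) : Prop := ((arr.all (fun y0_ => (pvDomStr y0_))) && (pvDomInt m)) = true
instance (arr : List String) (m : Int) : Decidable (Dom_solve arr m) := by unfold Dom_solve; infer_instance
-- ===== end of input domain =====

-- B replaces A's forward scan-with-early-exit by a backwards requirement pass plus one comparison (objective: alternative).

-- ===== PORT A =====
-- literal port of A: loop over arr carrying m, early return False when m < 0
def solveLoop (arr : List String) (m : Int) : Bool :=
  match arr with
  | [] => decide (m ≥ 0)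
  | i :: rest =>
    let m' := if i = "+" then m + 1 else if i = "-" then m - 1 else m
    if m' < 0 then false else solveLoop rest m'

def solve (arr : List String) (m : Int) : Bool := solveLoop arr m

-- ===== PORT B =====
-- port of B: 'for c in reversed(arr): req = max(0,req) ∓ 1' is a right fold over arr
def solveStep (c : String) (req : Int) : Int :=
  if c = "+" then max 0 req - 1
  else if c = "-" then max 0 req + 1
  else max 0 req

def solve_alt (arr : List String) (m : Int) : Bool :=
  decide (m ≥ arr.foldr solveStep 0)

-- ===== PRECONDITION & SPEC =====
def Spec_solve (arr : List String) (m : Int) (out : Bool) : Prop := out = solve_alt arr m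
instance (arr : List String) (m : Int) (out : Bool) : Decidable (Spec_solve arr m out) := by unfold Spec_solve; infer_instance

-- ===== CLAIM (what is proved, stated in full; the proofs are below) =====
def Claim_equal_solve : Prop := ∀ (arr : List String) (m : Int), Dom_solve arr m → Spec_solve arr m (solve arr m)

-- ===== LEMMAS AND PROOFS =====
-- A's loop accepts exactly the initial piles m that reach the requirement threshold.
theorem solveLoop_eq_req (arr : List String) (m : Int) :
    solveLoop arr m = decide (m ≥ arr.foldr solveStep 0) := by
  induction arr generalizing m with
  | nil => rfl
  | cons c rest ih =>
    simp only [solveLoop, List.foldr_cons, solveStep, ih]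
    by_cases h1 : c = "+" <;> by_cases h2 : c = "-" <;>
      simp only [h1, h2, if_pos, if_false] <;>
      split_ifs with h <;> simp <;> omega

-- ===== VERDICT (by name: the statement is the Claim_ definition above) =====
theorem solve_spec : Claim_equal_solve := by
  intro arr m _
  unfold Spec_solve solve
  exact solveLoop_eq_req arr m
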